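-- pv_equiv track=rewrite | github.com/brianjp93/aoc2015 | day08/day8.py | convert_new_string
-- ===== SOURCE A (Python) =====
-- def convert_new_string(s):
--     out = ['"']
--     i = 0
--     while i < len(s):
--         ch = s[i]
--         if ch in ["\\", '"']:
--             out.append("\\" + ch)
--         else:
--             out.append(ch)
--         i += 1
--     out.append('"')
--     return "".join(out)
-- ===== SOURCE B (Python) =====
-- def convert_new_string(s):
--     return '"' + s.replace("\\", "\\\\").replace('"', '\\"') + '"'
-- ===== Notes on version B (the rewrite author's own statement) =====
-- stated objective: idiomatic
-- what changed: Replaces the index-driven per-character branch-and-append loop by two whole-string replace passes (backslash first, then quote) and a single concatenation with the surrounding quotes.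
import Mathlib
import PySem

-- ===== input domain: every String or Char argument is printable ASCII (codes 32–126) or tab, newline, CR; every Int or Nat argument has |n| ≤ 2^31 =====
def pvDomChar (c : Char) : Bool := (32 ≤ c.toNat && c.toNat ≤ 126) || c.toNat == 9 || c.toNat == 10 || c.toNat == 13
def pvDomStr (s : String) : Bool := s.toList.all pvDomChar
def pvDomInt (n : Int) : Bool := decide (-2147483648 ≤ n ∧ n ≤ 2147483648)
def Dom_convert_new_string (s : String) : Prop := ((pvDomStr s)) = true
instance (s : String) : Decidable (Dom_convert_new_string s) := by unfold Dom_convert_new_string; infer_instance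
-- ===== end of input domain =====

-- B escapes the string with two whole-string replace passes (backslash first, then quote) and one
-- concatenation, instead of A's index-driven per-character branch-and-append loop; objective: idiomatic.

-- ===== PORT A =====
-- A's while-loop over indices 0..len(s)-1, reading s[i] each turn, is the structural recursion
-- over s.toList below with the growing accumulator `out` (Python's list of one-char strings).
def convertLoopA : List Char → List String → List String
  | [], out => out
  | ch :: t, out =>
      convertLoopA t
        (out ++ [if ch = '\\' ∨ ch = '"' then String.ofList ['\\', ch] else String.ofList [ch]])

def convert_new_string (s : String) : String :=
  PySem.Str.join "" (convertLoopA s.toList ["\""] ++ ["\""])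

-- ===== PORT B =====
def convert_new_string_alt (s : String) : String :=
  "\"" ++ PySem.Str.replace (PySem.Str.replace s "\\" "\\\\") "\"" "\\\"" ++ "\""

-- ===== PRECONDITION & SPEC =====
def Spec_convert_new_string (s : String) (out : String) : Prop := out = convert_new_string_alt s
instance (s : String) (out : String) : Decidable (Spec_convert_new_string s out) := by unfold Spec_convert_new_string; infer_instance

-- ===== CLAIM (what is proved, stated in full; the proofs are below) =====
def Claim_equal_convert_new_string : Prop := ∀ (s : String), Dom_convert_new_string s → Spec_convert_new_string s (convert_new_string s)

-- ===== LEMMAS AND PROOFS =====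

-- the per-character escape both sides ultimately perform
def escA (c : Char) : List Char := if c = '\\' ∨ c = '"' then ['\\', c] else [c]

lemma convertLoopA_acc (cs : List Char) (out : List String) :
    convertLoopA cs out = out ++ cs.map (fun c => String.ofList (escA c)) := by
  induction cs generalizing out with
  | nil => simp [convertLoopA]
  | cons c t ih => simp only [convertLoopA, ih, escA]; split_ifs <;> simp_all

lemma join_empty (parts : List (List Char)) : PySem.Chars.join [] parts = parts.flatten := by
  simp only [PySem.Chars.join]
  induction parts with
  | nil => simp [List.intercalate]
  | cons p t ih => cases t <;> simp_all [List.intercalate, List.intersperse]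

lemma go_succ (old new : List Char) (fuel : Nat) (c : Char) (t acc : List Char) :
    PySem.Chars.replace.go old new (fuel+1) (c::t) acc =
      if old.isPrefixOf (c::t) then
        PySem.Chars.replace.go old new fuel (List.drop old.length (c::t)) (new.reverse ++ acc)
      else PySem.Chars.replace.go old new fuel t (c::acc) := rfl

lemma go_nil (old new : List Char) (fuel : Nat) (acc : List Char) :
    PySem.Chars.replace.go old new fuel [] acc = acc.reverse := by
  cases fuel <;> simp [PySem.Chars.replace.go]

lemma replace_single_go (o : Char) (new cs acc : List Char) (fuel : Nat)
    (h : cs.length ≤ fuel) :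
    PySem.Chars.replace.go [o] new fuel cs acc
      = acc.reverse ++ cs.flatMap (fun c => if c = o then new else [c]) := by
  induction cs generalizing acc fuel with
  | nil => simp [go_nil]
  | cons c t ih =>
      cases fuel with
      | zero => simp at h
      | succ fuel =>
          rw [go_succ]
          simp only [List.length_cons, Nat.add_le_add_iff_right] at h
          by_cases hc : c = o
          · subst hc
            have hp : List.isPrefixOf [c] (c::t) = true := by simp [List.isPrefixOf]
            rw [hp]; simp [ih _ _ h]
          · have hp : List.isPrefixOf [o] (c::t) = false := by
              simp only [List.isPrefixOf, Bool.and_eq_false_iff, beq_eq_false_iff_ne]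
              exact Or.inl fun hco => absurd hco.symm hc
            rw [hp]; simp [ih _ _ h, hc]

-- s.replace(old, new) for a single-character old is the per-character flatMap
lemma replace_single (o : Char) (new cs : List Char) :
    PySem.Chars.replace cs [o] new = cs.flatMap (fun c => if c = o then new else [c]) := by
  simp [PySem.Chars.replace, replace_single_go o new cs [] cs.length le_rfl]

lemma two_replaces (cs : List Char) :
    PySem.Chars.replace (PySem.Chars.replace cs ['\\'] ['\\', '\\']) ['"'] ['\\', '"']
      = cs.flatMap escA := by
  rw [replace_single, replace_single, List.flatMap_assoc]
  refine List.flatMap_congr (fun c _ => ?_)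
  by_cases h1 : c = '\\' <;> by_cases h2 : c = '"' <;> simp_all [escA]

lemma toList_A (s : String) :
    (convert_new_string s).toList = '"' :: s.toList.flatMap escA ++ ['"'] := by
  have he : "".toList = ([] : List Char) := rfl
  simp only [convert_new_string, PySem.Str.join, String.toList_ofList, convertLoopA_acc, he]
  rw [join_empty]
  induction s.toList with
  | nil => rfl
  | cons c t ih => simp_all

lemma toList_B (s : String) :
    (convert_new_string_alt s).toList = '"' :: s.toList.flatMap escA ++ ['"'] := by
  simp only [convert_new_string_alt, String.toList_append, PySem.Str.replace,
    String.toList_ofList]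
  have h1 : "\\".toList = ['\\'] := rfl
  have h2 : "\\\\".toList = ['\\', '\\'] := rfl
  have h3 : "\"".toList = ['"'] := rfl
  have h4 : "\\\"".toList = ['\\', '"'] := rfl
  rw [h1, h2, h3, h4, two_replaces]
  rfl

-- ===== VERDICT (by name: the statement is the Claim_ definition above) =====
theorem convert_new_string_spec : Claim_equal_convert_new_string := by
  intro s _
  unfold Spec_convert_new_string
  exact String.toList_inj.mp ((toList_A s).trans (toList_B s).symm)
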